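-- pv_equiv track=rewrite | github.com/GuoXueyi/ThermalizationAndIrreversibilityOfAnIsolatedQuantumSystem | fig2_PRLSubmit.py | generate_all_states
-- ===== SOURCE A (Python) =====
-- import itertools
--
-- def generate_all_states(N, n):
--     """ 生成所有可能的填充情况 """
--     positions = list(range(N))
--     red_combinations = list(itertools.combinations(positions, n))
--     blue_combinations = list(itertools.combinations(positions, n))
--     all_states = []
--
--     for red_pos in red_combinations:
--         for blue_pos in blue_combinations:
--             state = [(1 if i in red_pos else 0, 1 if i in blue_pos else 0) for i in range(N)]
--             all_states.append(tuple(state))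
--
--     return all_states
-- ===== SOURCE B (Python) =====
-- def generate_all_states(N, n):
--     """Dynamic programming over sites: build, suffix by suffix, the table of 0/1
--     indicator vectors keyed by their number of ones (no itertools, no index
--     combinations, no membership tests), keeping only rows that can still reach
--     exactly n ones, then pair every red vector with every blue vector."""
--     length = max(N, 0)
--     if n < 0 or n > length:
--         vecs = []
--     else:
--         # table[j] = all 0/1 vectors of the current suffix length with exactly j ones,
--         # ordered with a leading 1 before a leading 0 (= combination order of A)
--         table = [[()]] + [[] for _ in range(n)]
--         for i in range(length):
--             rem = length - (i + 1)  # sites still to be prepended after this step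
--             table = [(([(1,) + t for t in table[j - 1]] if j > 0 else [])
--                       + [(0,) + t for t in table[j]])
--                      if n - rem <= j else []
--                      for j in range(n + 1)]
--         vecs = table[n]
--     return [tuple(zip(r, b)) for r in vecs for b in vecs]
-- ===== Notes on version B (the rewrite author's own statement) =====
-- stated objective: alternative
-- what changed: B replaces itertools index-combinations plus per-index membership tests by a dynamic-programming table over sites that enumerates the 0/1 indicator vectors with exactly n ones directly (pruning rows that cannot reach n ones), then zips red and blue vectors.
import Mathlib
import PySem

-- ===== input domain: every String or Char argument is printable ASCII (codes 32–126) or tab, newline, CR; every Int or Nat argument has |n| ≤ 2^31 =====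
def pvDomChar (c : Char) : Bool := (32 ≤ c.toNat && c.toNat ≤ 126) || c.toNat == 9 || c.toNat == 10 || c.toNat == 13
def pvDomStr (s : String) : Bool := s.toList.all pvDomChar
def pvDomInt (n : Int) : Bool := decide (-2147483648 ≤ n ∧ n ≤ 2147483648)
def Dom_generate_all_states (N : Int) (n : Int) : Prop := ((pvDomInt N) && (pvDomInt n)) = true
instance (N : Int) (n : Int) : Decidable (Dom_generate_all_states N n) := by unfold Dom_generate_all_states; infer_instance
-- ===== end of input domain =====

-- B replaces index combinations + per-index membership tests by a DP over sites that
-- enumerates the 0/1 indicator vectors with exactly n ones directly (objective: alternative).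

-- ===== PORT A =====
-- itertools.combinations(l, k) in lexicographic order
def pvCombs (k : Nat) (l : List Int) : List (List Int) :=
  match k, l with
  | 0, _ => [[]]
  | _ + 1, [] => []
  | k + 1, x :: xs => (pvCombs k xs).map (fun c => x :: c) ++ pvCombs (k + 1) xs

def generate_all_states (N : Int) (n : Int) : List (List (Int × Int)) :=
  let positions := PySem.List.pyRange 0 N 1
  let red_combinations := pvCombs n.toNat positions
  let blue_combinations := pvCombs n.toNat positions
  red_combinations.foldl (fun acc red_pos =>
    blue_combinations.foldl (fun acc blue_pos =>
      acc ++ [positions.map (fun i =>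
        ((if red_pos.contains i then (1 : Int) else 0),
         (if blue_pos.contains i then (1 : Int) else 0)))]) acc) []

-- ===== PORT B =====
-- one DP step: table[j] = all suffix vectors with exactly j ones; rows that can no
-- longer reach exactly nn ones in the remaining rem prefix sites are pruned to []
def pvStep (nn rem : Nat) (table : List (List (List Int))) : List (List (List Int)) :=
  (List.range (nn + 1)).map (fun (j : Nat) =>
    if (nn : Int) - (rem : Int) ≤ (j : Int) then
      (if j > 0 then (table.getD (j - 1) []).map (fun t => (1 : Int) :: t) else [])
        ++ (table.getD j []).map (fun t => (0 : Int) :: t)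
    else [])

def generate_all_states_alt (N : Int) (n : Int) : List (List (Int × Int)) :=
  let length := N.toNat
  let vecs :=
    if n < 0 || (length : Int) < n then []
    else
      let nn := n.toNat
      let table := (List.range length).foldl (fun tb i => pvStep nn (length - (i + 1)) tb)
        ([[[]]] ++ List.replicate nn [])
      table.getD nn []
  vecs.flatMap (fun r => vecs.map (fun b => r.zip b))

-- ===== PRECONDITION & SPEC =====
-- Pre_: itertools.combinations raises ValueError for negative n; A returns normally iff 0 ≤ n.
def Pre_generate_all_states (N : Int) (n : Int) : Prop := 0 ≤ n
instance (N : Int) (n : Int) : Decidable (Pre_generate_all_states N n) := by unfold Pre_generate_all_states; infer_instance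
def pvWitness_generate_all_states : Int × Int := (3, 1)

def Spec_generate_all_states (N : Int) (n : Int) (out : List (List (Int × Int))) : Prop := out = generate_all_states_alt N n
instance (N : Int) (n : Int) (out : List (List (Int × Int))) : Decidable (Spec_generate_all_states N n out) := by unfold Spec_generate_all_states; infer_instance

-- ===== CLAIM (what is proved, stated in full; the proofs are below) =====
def Claim_equal_generate_all_states : Prop := ∀ (N : Int) (n : Int), Dom_generate_all_states N n → Pre_generate_all_states N n → Spec_generate_all_states N n (generate_all_states N n)

-- ===== LEMMAS AND PROOFS =====

-- proof-only recursive characterisation of the DP table rows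
def pvBv : Nat → Nat → List (List Int)
  | 0, 0 => [[]]
  | 0, _ + 1 => []
  | L + 1, 0 => (pvBv L 0).map (fun t => (0 : Int) :: t)
  | L + 1, o + 1 => (pvBv L o).map (fun t => (1 : Int) :: t)
      ++ (pvBv L (o + 1)).map (fun t => (0 : Int) :: t)

lemma pvBv_nil_of_lt (L o : Nat) (h : L < o) : pvBv L o = [] := by
  induction L generalizing o with
  | zero => cases o with
    | zero => omega
    | succ o => rfl
  | succ L ih =>
    cases o with
    | zero => omega
    | succ o =>
      simp [pvBv, ih o (by omega), ih (o + 1) (by omega)]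

lemma pvCombs_subset (k : Nat) (l : List Int) (c : List Int) (hc : c ∈ pvCombs k l) :
    ∀ a ∈ c, a ∈ l := by
  induction l generalizing k c with
  | nil =>
    cases k with
    | zero => simp [pvCombs] at hc; simp [hc]
    | succ k => simp [pvCombs] at hc
  | cons x xs ih =>
    cases k with
    | zero =>
      simp [pvCombs] at hc; simp [hc]
    | succ k =>
      simp only [pvCombs, List.mem_append, List.mem_map] at hc
      rcases hc with ⟨c', hc', rfl⟩ | hc
      · intro a ha
        rcases List.mem_cons.mp ha with rfl | ha
        · exact List.mem_cons_self
        · exact List.mem_cons_of_mem _ (ih k c' hc' a ha)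
      · intro a ha
        exact List.mem_cons_of_mem _ (ih (k + 1) c hc a ha)

-- combinations mapped through the indicator map equal the DP vectors
lemma combs_bits (l : List Int) (hl : l.Nodup) (k : Nat) :
    (pvCombs k l).map (fun c => l.map (fun i => if c.contains i then (1 : Int) else 0))
      = pvBv l.length k := by
  induction l generalizing k with
  | nil =>
    cases k with
    | zero => rfl
    | succ k => rfl
  | cons x xs ih =>
    rcases List.nodup_cons.mp hl with ⟨hx, hxs⟩
    cases k with
    | zero =>
      simp only [pvCombs, List.map_cons, List.map_nil, List.length_cons, pvBv]
      rw [← ih hxs 0]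
      simp [pvCombs]
    | succ k =>
      simp only [pvCombs, List.map_append, List.map_map, List.length_cons, pvBv]
      congr 1
      · rw [← ih hxs k, List.map_map]
        apply List.map_congr_left
        intro c _
        simp only [Function.comp]
        have h1 : (x :: xs).map (fun i => if (x :: c).contains i then (1 : Int) else 0)
            = 1 :: xs.map (fun i => if c.contains i then (1 : Int) else 0) := by
          simp only [List.map_cons, List.contains_cons, beq_self_eq_true, Bool.true_or,
            if_true, List.cons.injEq, true_and]
          apply List.map_congr_left
          intro a ha
          have : (a == x) = false := by
            simp only [beq_eq_false_iff_ne, ne_eq]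
            intro h; exact hx (h ▸ ha)
          simp [this]
        simpa using h1
      · rw [← ih hxs (k + 1), List.map_map]
        apply List.map_congr_left
        intro c hc
        have hxc : x ∉ c := fun h => hx (pvCombs_subset (k + 1) xs c hc x h)
        simp [hxc]

lemma getD_map_range {α : Type} (m j : Nat) (f : Nat → α) (d : α) (h : j < m) :
    ((List.range m).map f).getD j d = f j := by
  rw [List.getD_eq_getElem?_getD]
  simp [h]

lemma init_table (nn L : Nat) (h : nn ≤ L) :
    ([[([] : List Int)]] ++ List.replicate nn ([] : List (List Int)))
      = (List.range (nn + 1)).map (fun j => if nn ≤ j + L then pvBv 0 j else []) := by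
  apply List.ext_getElem
  · simp
  · intro i h1 h2
    simp only [List.length_range, List.length_map] at h2
    rw [List.getElem_map, List.getElem_range]
    cases i with
    | zero => simp [pvBv, h]
    | succ i =>
      rw [List.getElem_append_right (by simp : [[([] : List Int)]].length ≤ i + 1)]
      rcases le_or_gt nn (i + 1 + L) with hle | hlt
      · simp [List.getElem_replicate, pvBv, hle]
      · simp [List.getElem_replicate, pvBv, Nat.not_le.mpr hlt]

lemma step_table (nn rem i : Nat) :
    pvStep nn rem ((List.range (nn + 1)).map (fun j => if nn ≤ j + (rem + 1) then pvBv i j else []))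
      = (List.range (nn + 1)).map (fun j => if nn ≤ j + rem then pvBv (i + 1) j else []) := by
  unfold pvStep
  apply List.map_congr_left
  intro j hj
  have hjlt : j < nn + 1 := List.mem_range.mp hj
  rcases le_or_gt nn (j + rem) with hkeep | hprune
  · rw [if_pos (by push_cast; omega), if_pos hkeep]
    cases j with
    | zero =>
      rw [getD_map_range _ 0 _ _ hjlt]
      rw [if_pos (by omega : nn ≤ 0 + (rem + 1))]
      simp [pvBv]
    | succ j =>
      rw [getD_map_range _ (j + 1) _ _ hjlt]
      have hsub : j + 1 - 1 = j := by omega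
      rw [hsub, getD_map_range _ j _ _ (by omega)]
      rw [if_pos (by omega : nn ≤ j + (rem + 1)), if_pos (by omega : nn ≤ j + 1 + (rem + 1))]
      simp [pvBv]
  · rw [if_neg (by push_cast; omega), if_neg (by omega)]

lemma table_eq (nn L K : Nat) (h : nn ≤ L) (hK : K ≤ L) :
    (List.range K).foldl (fun tb i => pvStep nn (L - (i + 1)) tb) ([[[]]] ++ List.replicate nn [])
      = (List.range (nn + 1)).map (fun j => if nn ≤ j + (L - K) then pvBv K j else []) := by
  induction K with
  | zero => simpa using init_table nn L h
  | succ K ih =>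
    rw [List.range_succ, List.foldl_append, ih (by omega)]
    have hrem : L - K = (L - (K + 1)) + 1 := by omega
    simp only [List.foldl_cons, List.foldl_nil]
    rw [hrem] 
    exact step_table nn (L - (K + 1)) K

lemma vecs_eq (N : Int) (n : Int) (hn : 0 ≤ n) :
    (if n < 0 || ((N.toNat : Nat) : Int) < n then []
     else ((List.range N.toNat).foldl (fun tb i => pvStep n.toNat (N.toNat - (i + 1)) tb)
        ([[[]]] ++ List.replicate n.toNat [])).getD n.toNat [])
    = (pvCombs n.toNat (PySem.List.pyRange 0 N 1)).map
        (fun c => (PySem.List.pyRange 0 N 1).map (fun i => if c.contains i then (1 : Int) else 0)) := by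
  have hnodup : (PySem.List.pyRange 0 N 1).Nodup := PySem.List.nodup_pyRange_one 0 N
  have hlen : (PySem.List.pyRange 0 N 1).length = N.toNat := by
    rw [PySem.List.length_pyRange_one]; simp
  rw [combs_bits _ hnodup n.toNat, hlen]
  by_cases h : ((N.toNat : Nat) : Int) < n
  · have hlt : N.toNat < n.toNat := by omega
    rw [if_pos (show (n < 0 || ((N.toNat : Nat) : Int) < n) = true by
      simp only [Bool.or_eq_true, decide_eq_true_eq]; right; exact h)]
    rw [pvBv_nil_of_lt _ _ hlt]
  · have hle : n.toNat ≤ N.toNat := by omega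
    rw [if_neg (show ¬ (n < 0 || ((N.toNat : Nat) : Int) < n) = true by
      simp only [Bool.or_eq_true, decide_eq_true_eq]; omega)]
    rw [table_eq n.toNat N.toNat N.toNat hle le_rfl]
    rw [getD_map_range (n.toNat + 1) n.toNat _ [] (by omega)]
    rw [if_pos (by omega)]

lemma inner_prod {α β : Type} (bc : List α) (f : α → List β) (acc : List (List β)) :
    bc.foldl (fun a b => a ++ [f b]) acc = acc ++ bc.map f := by
  induction bc generalizing acc with
  | nil => simp
  | cons b bs ih => simp [ih]

lemma foldl_prod {α β : Type} (rc bc : List α) (f : α → α → List β) :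
    rc.foldl (fun acc r => bc.foldl (fun a b => a ++ [f r b]) acc) []
      = rc.flatMap (fun r => bc.map (f r)) := by
  suffices h : ∀ acc, rc.foldl (fun acc r => bc.foldl (fun a b => a ++ [f r b]) acc) acc
      = acc ++ rc.flatMap (fun r => bc.map (f r)) by simpa using h []
  induction rc with
  | nil => intro acc; simp
  | cons r rs ih =>
    intro acc
    simp only [List.foldl_cons, List.flatMap_cons]
    rw [inner_prod bc (f r) acc, ih, List.append_assoc]

-- ===== VERDICT (by name: the statement is the Claim_ definition above) =====
theorem generate_all_states_spec : Claim_equal_generate_all_states := by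
  intro N n _ hn
  unfold Spec_generate_all_states
  show generate_all_states N n = generate_all_states_alt N n
  unfold generate_all_states generate_all_states_alt
  simp only []
  rw [vecs_eq N n hn, foldl_prod]
  simp [List.flatMap_map, List.map_map, Function.comp_def, List.zip_map']
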